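-- pv_equiv track=rewrite | github.com/Brighter-bits/AdventOfCode2025 | Day10.py | Pass
-- ===== SOURCE A (Python) =====
-- from itertools import combinations
--
-- def Pass(Goal, Buttons, passes) -> bool:
--     if passes == 1:
--         for i in Buttons:
--             if Goal == i:
--                 return True
--     else:
--         for attempt in combinations(Buttons, passes):
--             combo = attempt[0]
--             for part in attempt[1:]:
--                 combo ^= part
--             if combo == Goal:
--                 return True
--     return False
-- ===== SOURCE B (Python) =====
-- def _xors_by_size(items, cap):
--     # sets[j] = set of XORs of all size-j subsets of items, for j = 0..cap
--     sets = [{0}] + [set() for _ in range(cap)]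
--     for b in items:
--         sets = [sets[0]] + [cur | {x ^ b for x in prev}
--                             for prev, cur in zip(sets, sets[1:])]
--     return sets
--
--
-- def Pass(Goal, Buttons, passes) -> bool:
--     # meet in the middle: XOR values of exactly-i subsets of each half, by size
--     n = len(Buttons)
--     if passes < 0 or passes > n:
--         return False
--     half = n // 2
--     left = _xors_by_size(Buttons[:half], min(passes, half))
--     right = _xors_by_size(Buttons[half:], min(passes, n - half))
--     return any((Goal ^ x) in right[passes - i]
--                for i in range(len(left)) if passes - i < len(right)
--                for x in left[i])
-- ===== Notes on version B (the rewrite author's own statement) =====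
-- stated objective: alternative
-- what changed: Replaces enumeration of all C(n,k) exact-k combinations with a meet-in-the-middle scheme: for each half of Buttons a size-indexed family of sets of achievable subset XORs is built by dynamic programming, and the answer is a membership lookup of the complement Goal^x across the two halves; much faster when no early hit exists and k ~ n/2, but not measured faster on the generated timing inputs, so no speed is claimed.
import Mathlib
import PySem

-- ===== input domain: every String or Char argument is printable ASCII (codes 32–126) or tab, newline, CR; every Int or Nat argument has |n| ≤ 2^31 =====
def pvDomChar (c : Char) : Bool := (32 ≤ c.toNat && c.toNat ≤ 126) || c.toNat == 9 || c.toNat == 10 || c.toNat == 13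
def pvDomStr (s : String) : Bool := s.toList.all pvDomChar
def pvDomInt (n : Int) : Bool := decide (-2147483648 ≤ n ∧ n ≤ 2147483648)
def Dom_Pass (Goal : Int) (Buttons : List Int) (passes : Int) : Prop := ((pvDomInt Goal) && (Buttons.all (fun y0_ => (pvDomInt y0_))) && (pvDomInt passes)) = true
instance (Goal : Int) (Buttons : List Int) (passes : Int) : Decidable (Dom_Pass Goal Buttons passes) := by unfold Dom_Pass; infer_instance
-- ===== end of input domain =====

-- B replaces exact-k combination enumeration by meet-in-the-middle over size-indexed XOR-value sets (alternative algorithm; no speed claimed).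


-- ===== PORT A =====
-- combo = attempt[0]; for part in attempt[1:]: combo ^= part
def pvXorCombo : List Int → Int
  | [] => 0          -- attempt[0] on () raises IndexError (only reached when passes == 0, outside Pre_)
  | c :: rest => rest.foldl (fun combo part => PySem.Int.bxor combo part) c

def Pass (Goal : Int) (Buttons : List Int) (passes : Int) : Bool :=
  if passes == 1 then
    Buttons.any (fun i => Goal == i)
  else
    (PySem.List.combinations Buttons passes.toNat).any (fun attempt => pvXorCombo attempt == Goal)

-- ===== PORT B =====
-- sets = [sets[0]] + [cur | {x ^ b for x in prev} for prev, cur in zip(sets, sets[1:])]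
def pvStep (b : Int) (sets : List (PySem.Set Int)) : List (PySem.Set Int) :=
  match sets with
  | [] => []         -- unreachable: sets is always nonempty
  | s0 :: rest =>
      s0 :: List.zipWith
        (fun prev cur => PySem.Set.union cur (PySem.Set.ofList (prev.map (fun x => PySem.Int.bxor x b))))
        sets rest

def pvXorsBySize (items : List Int) (cap : Int) : List (PySem.Set Int) :=
  items.foldl (fun sets b => pvStep b sets)
    (PySem.Set.ofList [0] :: List.replicate cap.toNat PySem.Set.empty)

def Pass_alt (Goal : Int) (Buttons : List Int) (passes : Int) : Bool :=
  if passes < 0 ∨ (Buttons.length : Int) < passes then false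
  else
    let half := Buttons.length / 2                 -- n // 2 (nonneg: exact)
    let left := pvXorsBySize (Buttons.take half) (min passes (half : Int))      -- Buttons[:half]
    let right := pvXorsBySize (Buttons.drop half) (min passes ((Buttons.length : Int) - (half : Int)))  -- Buttons[half:]
    (List.range left.length).any (fun i =>
      decide (passes.toNat - i < right.length) &&
      (left.getD i PySem.Set.empty).any (fun x =>
        PySem.Set.contains (right.getD (passes.toNat - i) PySem.Set.empty) (PySem.Int.bxor Goal x)))

-- ===== PRECONDITION & SPEC =====
-- Pre_ excludes exactly the inputs where A raises: passes == 0 (IndexError on attempt[0]) and passes < 0 (ValueError).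
def Pre_Pass (Goal : Int) (Buttons : List Int) (passes : Int) : Prop := 1 ≤ passes
instance (Goal : Int) (Buttons : List Int) (passes : Int) : Decidable (Pre_Pass Goal Buttons passes) := by unfold Pre_Pass; infer_instance
def pvWitness_Pass : Int × List Int × Int := (3, [1, 2], 2)


def Spec_Pass (Goal : Int) (Buttons : List Int) (passes : Int) (out : Bool) : Prop := out = Pass_alt Goal Buttons passes
instance (Goal : Int) (Buttons : List Int) (passes : Int) (out : Bool) : Decidable (Spec_Pass Goal Buttons passes out) := by unfold Spec_Pass; infer_instance

-- ===== CLAIM (what is proved, stated in full; the proofs are below) =====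
def Claim_equal_Pass : Prop := ∀ (Goal : Int) (Buttons : List Int) (passes : Int), Dom_Pass Goal Buttons passes → Pre_Pass Goal Buttons passes → Spec_Pass Goal Buttons passes (Pass Goal Buttons passes)

-- ===== LEMMAS AND PROOFS =====

-- XOR algebra on PySem.Int.bxor
theorem pvBxor_ofNat_ofNat (m n : Nat) : PySem.Int.bxor (Int.ofNat m) (Int.ofNat n) = Int.ofNat (m ^^^ n) := by
  unfold PySem.Int.bxor
  rw [if_pos (show (0:Int) ≤ Int.ofNat m by exact Int.natCast_nonneg m), if_pos (show (0:Int) ≤ Int.ofNat n by exact Int.natCast_nonneg n)]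
  have h1 : (Int.ofNat m).toNat = m := rfl
  have h2 : (Int.ofNat n).toNat = n := rfl
  rw [h1, h2]; rfl
theorem pvBxor_ofNat_negSucc (m n : Nat) : PySem.Int.bxor (Int.ofNat m) (Int.negSucc n) = Int.negSucc (m ^^^ n) := by
  unfold PySem.Int.bxor
  rw [if_pos (show (0:Int) ≤ Int.ofNat m by exact Int.natCast_nonneg m), if_neg (by omega)]
  have h1 : (Int.ofNat m).toNat = m := rfl
  have h2 : (-(Int.negSucc n) - 1).toNat = n := by omega
  rw [h1, h2]; omega
theorem pvBxor_negSucc_ofNat (m n : Nat) : PySem.Int.bxor (Int.negSucc m) (Int.ofNat n) = Int.negSucc (m ^^^ n) := by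
  unfold PySem.Int.bxor
  rw [if_neg (by omega), if_pos (show (0:Int) ≤ Int.ofNat n by exact Int.natCast_nonneg n)]
  have h1 : (-(Int.negSucc m) - 1).toNat = m := by omega
  have h2 : (Int.ofNat n).toNat = n := rfl
  rw [h1, h2]; omega
theorem pvBxor_negSucc_negSucc (m n : Nat) : PySem.Int.bxor (Int.negSucc m) (Int.negSucc n) = Int.ofNat (m ^^^ n) := by
  unfold PySem.Int.bxor
  rw [if_neg (by omega), if_neg (by omega)]
  have h1 : (-(Int.negSucc m) - 1).toNat = m := by omega
  have h2 : (-(Int.negSucc n) - 1).toNat = n := by omega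
  rw [h1, h2]; rfl
theorem pvBxor_assoc (a b c : Int) : PySem.Int.bxor (PySem.Int.bxor a b) c = PySem.Int.bxor a (PySem.Int.bxor b c) := by
  cases a with
  | ofNat m => cases b with
    | ofNat n => cases c with
      | ofNat p => rw [pvBxor_ofNat_ofNat, pvBxor_ofNat_ofNat, pvBxor_ofNat_ofNat, pvBxor_ofNat_ofNat, Nat.xor_assoc]
      | negSucc p => rw [pvBxor_ofNat_ofNat, pvBxor_ofNat_negSucc, pvBxor_ofNat_negSucc, pvBxor_ofNat_negSucc, Nat.xor_assoc]
    | negSucc n => cases c with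
      | ofNat p => rw [pvBxor_ofNat_negSucc, pvBxor_negSucc_ofNat, pvBxor_negSucc_ofNat, pvBxor_ofNat_negSucc, Nat.xor_assoc]
      | negSucc p => rw [pvBxor_ofNat_negSucc, pvBxor_negSucc_negSucc, pvBxor_negSucc_negSucc, pvBxor_ofNat_ofNat, Nat.xor_assoc]
  | negSucc m => cases b with
    | ofNat n => cases c with
      | ofNat p => rw [pvBxor_negSucc_ofNat, pvBxor_ofNat_ofNat, pvBxor_negSucc_ofNat, pvBxor_negSucc_ofNat, Nat.xor_assoc]
      | negSucc p => rw [pvBxor_negSucc_ofNat, pvBxor_ofNat_negSucc, pvBxor_negSucc_negSucc, pvBxor_negSucc_negSucc, Nat.xor_assoc]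
    | negSucc n => cases c with
      | ofNat p => rw [pvBxor_negSucc_negSucc, pvBxor_negSucc_ofNat, pvBxor_ofNat_ofNat, pvBxor_negSucc_negSucc, Nat.xor_assoc]
      | negSucc p => rw [pvBxor_negSucc_negSucc, pvBxor_negSucc_negSucc, pvBxor_ofNat_negSucc, pvBxor_negSucc_ofNat, Nat.xor_assoc]

theorem pvZero_bxor (a : Int) : PySem.Int.bxor 0 a = a := by
  rw [PySem.Int.bxor_comm, PySem.Int.bxor_zero]

theorem pvBxor_cancel_right (x b : Int) : PySem.Int.bxor (PySem.Int.bxor x b) b = x := by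
  rw [pvBxor_assoc, PySem.Int.bxor_self, PySem.Int.bxor_zero]

-- xorAll: the XOR of a list
def xorAll (l : List Int) : Int := l.foldl PySem.Int.bxor 0

theorem foldl_bxor_shift (l : List Int) (a : Int) :
    l.foldl PySem.Int.bxor a = PySem.Int.bxor a (l.foldl PySem.Int.bxor 0) := by
  induction l generalizing a with
  | nil => simp [PySem.Int.bxor_zero]
  | cons h t ih =>
    simp only [List.foldl_cons]
    rw [ih (PySem.Int.bxor a h), ih (PySem.Int.bxor 0 h), pvZero_bxor, pvBxor_assoc]

theorem xorAll_nil : xorAll [] = 0 := rfl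
theorem xorAll_cons (c : Int) (r : List Int) : xorAll (c :: r) = r.foldl PySem.Int.bxor c := by
  simp [xorAll, pvZero_bxor]
theorem xorAll_singleton (b : Int) : xorAll [b] = b := by simp [xorAll, pvZero_bxor]
theorem xorAll_append (l1 l2 : List Int) : xorAll (l1 ++ l2) = PySem.Int.bxor (xorAll l1) (xorAll l2) := by
  simp only [xorAll, List.foldl_append]
  rw [foldl_bxor_shift l2 (l1.foldl PySem.Int.bxor 0)]

theorem pvXorCombo_eq (c : List Int) : pvXorCombo c = xorAll c := by
  cases c with
  | nil => rfl
  | cons h t => rw [pvXorCombo, xorAll_cons]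

-- achievability: some exactly-k sublist XORs to x
def Ach (l : List Int) (k : Nat) (x : Int) : Prop := ∃ c, c.Sublist l ∧ c.length = k ∧ xorAll c = x

theorem Ach_zero (l : List Int) (x : Int) : Ach l 0 x ↔ x = 0 := by
  constructor
  · rintro ⟨c, _, hlen, hx⟩
    rw [List.length_eq_zero_iff] at hlen; subst hlen; simp [xorAll_nil] at hx; omega
  · rintro rfl; exact ⟨[], List.nil_sublist l, rfl, rfl⟩

theorem Ach_nil (k : Nat) (x : Int) : Ach [] (k + 1) x ↔ False := by
  simp only [iff_false]
  rintro ⟨c, hsub, hlen, _⟩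
  rw [List.sublist_nil] at hsub; subst hsub; simp at hlen

theorem Ach_one (l : List Int) (x : Int) : Ach l 1 x ↔ x ∈ l := by
  constructor
  · rintro ⟨c, hsub, hlen, hx⟩
    rw [List.length_eq_one_iff] at hlen
    obtain ⟨a, rfl⟩ := hlen
    rw [List.singleton_sublist] at hsub
    rw [xorAll_singleton] at hx; subst hx; exact hsub
  · intro hx
    exact ⟨[x], List.singleton_sublist.mpr hx, rfl, xorAll_singleton x⟩

theorem Ach_snoc (l : List Int) (b : Int) (k : Nat) (x : Int) :
    Ach (l ++ [b]) (k + 1) x ↔ Ach l (k + 1) x ∨ ∃ y, Ach l k y ∧ PySem.Int.bxor y b = x := by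
  constructor
  · rintro ⟨c, hsub, hlen, hx⟩
    rw [List.sublist_append_iff] at hsub
    obtain ⟨s, t, rfl, hs, ht⟩ := hsub
    rw [List.sublist_singleton] at ht
    rcases ht with rfl | rfl
    · left; exact ⟨s, hs, by simpa using hlen, by simpa using hx⟩
    · right
      refine ⟨xorAll s, ⟨s, hs, ?_, rfl⟩, ?_⟩
      · simpa using hlen
      · rw [← hx, xorAll_append, xorAll_singleton]
  · rintro (⟨c, hsub, hlen, hx⟩ | ⟨y, ⟨c, hsub, hlen, hy⟩, hx⟩)
    · exact ⟨c, hsub.trans (List.sublist_append_left l [b]), hlen, hx⟩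
    · refine ⟨c ++ [b], ?_, by simp [hlen], by rw [xorAll_append, xorAll_singleton, hy, hx]⟩
      exact hsub.append (List.Sublist.refl [b])

theorem Ach_split (L R : List Int) (k : Nat) (g : Int) :
    Ach (L ++ R) k g ↔ ∃ i, i ≤ k ∧ ∃ y, Ach L i y ∧ Ach R (k - i) (PySem.Int.bxor g y) := by
  constructor
  · rintro ⟨c, hsub, hlen, hx⟩
    rw [List.sublist_append_iff] at hsub
    obtain ⟨s, t, rfl, hs, ht⟩ := hsub
    rw [List.length_append] at hlen
    refine ⟨s.length, by omega, xorAll s, ⟨s, hs, rfl, rfl⟩, ⟨t, ht, by omega, ?_⟩⟩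
    rw [← hx, xorAll_append, PySem.Int.bxor_comm (xorAll s), pvBxor_cancel_right]
  · rintro ⟨i, hik, y, ⟨c1, hs1, hl1, hx1⟩, ⟨c2, hs2, hl2, hx2⟩⟩
    refine ⟨c1 ++ c2, hs1.append hs2, by simp [hl1, hl2]; omega, ?_⟩
    rw [xorAll_append, hx1, hx2, PySem.Int.bxor_comm g y, ← pvBxor_assoc, PySem.Int.bxor_self, pvZero_bxor]

-- ===== A-side characterization =====
theorem Pass_iff (Goal : Int) (Buttons : List Int) (passes : Int) (h : 1 ≤ passes) :
    Pass Goal Buttons passes = true ↔ Ach Buttons passes.toNat Goal := by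
  unfold Pass
  by_cases h1 : passes = 1
  · subst h1
    simp only [beq_self_eq_true, if_true, List.any_eq_true, beq_iff_eq]
    show (∃ i ∈ Buttons, Goal = i) ↔ Ach Buttons (1 : Int).toNat Goal
    rw [show ((1 : Int).toNat) = 1 from rfl, Ach_one]
    constructor
    · rintro ⟨i, hi, rfl⟩; exact hi
    · intro hg; exact ⟨Goal, hg, rfl⟩
  · rw [if_neg (by simpa using h1)]
    simp only [List.any_eq_true, beq_iff_eq]
    constructor
    · rintro ⟨a, ha, hxa⟩
      rw [PySem.List.mem_combinations_iff] at ha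
      exact ⟨a, ha.1, ha.2, by rw [← pvXorCombo_eq, hxa]⟩
    · rintro ⟨c, hsub, hlen, hx⟩
      exact ⟨c, (PySem.List.mem_combinations_iff _ _ _).mpr ⟨hsub, hlen⟩, by rw [pvXorCombo_eq, hx]⟩

-- ===== B-side characterization =====
theorem length_pvStep (b : Int) (sets : List (PySem.Set Int)) (h : sets ≠ []) :
    (pvStep b sets).length = sets.length := by
  cases sets with
  | nil => simp at h
  | cons s0 rest => simp [pvStep]

theorem pvStep_getD_zero (b : Int) (sets : List (PySem.Set Int)) (h : sets ≠ []) :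
    (pvStep b sets).getD 0 PySem.Set.empty = sets.getD 0 PySem.Set.empty := by
  cases sets with
  | nil => simp at h
  | cons s0 rest => simp [pvStep]

theorem pvStep_getD_succ (b : Int) (sets : List (PySem.Set Int)) (j : Nat) (hj : j + 1 < sets.length) :
    (pvStep b sets).getD (j + 1) PySem.Set.empty =
      PySem.Set.union (sets.getD (j + 1) PySem.Set.empty)
        (PySem.Set.ofList ((sets.getD j PySem.Set.empty).map (fun x => PySem.Int.bxor x b))) := by
  cases sets with
  | nil => simp at hj
  | cons s0 rest =>
    simp only [pvStep, List.getD_cons_succ]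
    have hlen : j < (List.zipWith (fun prev cur => PySem.Set.union cur (PySem.Set.ofList (prev.map (fun x => PySem.Int.bxor x b)))) (s0 :: rest) rest).length := by
      simp at hj ⊢; omega
    rw [List.getD_eq_getElem _ _ hlen, List.getElem_zipWith]
    have h1 : j < (s0 :: rest).length := by simp at hj ⊢; omega
    have h2 : j < rest.length := by simp at hj; omega
    rw [List.getD_eq_getElem _ _ h1, List.getD_eq_getElem _ _ h2]

-- the foldl with a Nat capacity
def pvF (items : List Int) (cap : Nat) : List (PySem.Set Int) :=
  items.foldl (fun sets b => pvStep b sets) (PySem.Set.ofList [0] :: List.replicate cap PySem.Set.empty)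

theorem pvXorsBySize_eq (items : List Int) (cap : Int) : pvXorsBySize items cap = pvF items cap.toNat := rfl

theorem length_pvF (items : List Int) (cap : Nat) : (pvF items cap).length = cap + 1 := by
  induction items using List.reverseRecOn with
  | nil => simp [pvF]
  | append_singleton l b ih =>
    unfold pvF at ih ⊢
    rw [List.foldl_append, List.foldl_cons, List.foldl_nil, length_pvStep, ih]
    intro hnil
    have := congrArg List.length hnil
    rw [ih] at this; simp at this

theorem mem_pvF (items : List Int) (cap : Nat) (j : Nat) (hj : j ≤ cap) (x : Int) :
    x ∈ (pvF items cap).getD j PySem.Set.empty ↔ Ach items j x := by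
  induction items using List.reverseRecOn generalizing j x with
  | nil =>
    cases j with
    | zero =>
      show x ∈ (PySem.Set.ofList [0]) ↔ _
      rw [Ach_zero]
      simp [PySem.Set.mem_ofList]
    | succ j' =>
      have : (pvF [] cap).getD (j' + 1) PySem.Set.empty = PySem.Set.empty := by
        unfold pvF
        rw [List.foldl_nil, List.getD_cons_succ]
        rcases Nat.lt_or_ge j' (List.replicate cap (PySem.Set.empty (α := Int))).length with h | h
        · rw [List.getD_eq_getElem _ _ h, List.getElem_replicate]
        · rw [List.getD_eq_default _ _ h]
      rw [this, Ach_nil]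
      simp [PySem.Set.empty]

  | append_singleton l b ih =>
    have hF : pvF (l ++ [b]) cap = pvStep b (pvF l cap) := by
      unfold pvF; rw [List.foldl_append, List.foldl_cons, List.foldl_nil]
    have hne : pvF l cap ≠ [] := by
      intro hnil; have := congrArg List.length hnil
      rw [length_pvF] at this; simp at this
    cases j with
    | zero =>
      rw [hF, pvStep_getD_zero _ _ hne, ih 0 (Nat.zero_le cap)]
      rw [Ach_zero, Ach_zero]
    | succ j' =>
      have hjlt : j' + 1 < (pvF l cap).length := by rw [length_pvF]; omega
      rw [hF, pvStep_getD_succ _ _ _ hjlt, PySem.Set.mem_union, Ach_snoc]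
      rw [ih (j' + 1) hj, PySem.Set.mem_ofList]
      constructor
      · rintro (h | h)
        · exact Or.inl h
        · rw [List.mem_map] at h
          obtain ⟨y, hy, hxy⟩ := h
          exact Or.inr ⟨y, (ih j' (by omega) y).mp hy, hxy⟩
      · rintro (h | ⟨y, hy, hxy⟩)
        · exact Or.inl h
        · right; rw [List.mem_map]
          exact ⟨y, (ih j' (by omega) y).mpr hy, hxy⟩

theorem Ach_length_le (l : List Int) (k : Nat) (x : Int) (h : Ach l k x) : k ≤ l.length := by
  obtain ⟨c, hs, hl, _⟩ := h
  rw [← hl]; exact hs.length_le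

theorem Pass_alt_iff (Goal : Int) (Buttons : List Int) (passes : Int) (h : 1 ≤ passes)
    (hn : passes ≤ (Buttons.length : Int)) :
    Pass_alt Goal Buttons passes = true ↔ Ach Buttons passes.toNat Goal := by
  unfold Pass_alt
  rw [if_neg (by omega)]
  have hhalf : Buttons.length / 2 ≤ Buttons.length := Nat.div_le_self _ 2
  have hc1 : (min passes ((Buttons.length / 2 : Nat) : Int)).toNat = min passes.toNat (Buttons.length / 2) := by omega
  have hc2 : (min passes ((Buttons.length : Int) - ((Buttons.length / 2 : Nat) : Int))).toNat
      = min passes.toNat (Buttons.length - Buttons.length / 2) := by omega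
  conv_rhs => rw [← List.take_append_drop (Buttons.length / 2) Buttons]
  rw [Ach_split]
  simp only [List.any_eq_true, List.mem_range, pvXorsBySize_eq, length_pvF, hc1, hc2,
    Bool.and_eq_true, decide_eq_true_eq]
  constructor
  · rintro ⟨i, hi, hg, x, hx, hc⟩
    rw [PySem.Set.contains_iff] at hc
    refine ⟨i, by omega, x, (mem_pvF _ _ i (by omega) x).mp hx, ?_⟩
    exact (mem_pvF _ _ (passes.toNat - i) (by omega) _).mp hc
  · rintro ⟨i, hik, y, hLy, hRy⟩
    have hiL : i ≤ Buttons.length / 2 := by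
      have := Ach_length_le _ _ _ hLy
      rw [List.length_take] at this; omega
    have hiR : passes.toNat - i ≤ Buttons.length - Buttons.length / 2 := by
      have := Ach_length_le _ _ _ hRy
      rw [List.length_drop] at this; omega
    refine ⟨i, by omega, by omega, y, (mem_pvF _ _ i (by omega) y).mpr hLy, ?_⟩
    rw [PySem.Set.contains_iff]
    exact (mem_pvF _ _ (passes.toNat - i) (by omega) _).mpr hRy

-- ===== VERDICT (by name: the statement is the Claim_ definition above) =====
theorem Pass_spec : Claim_equal_Pass := by
  intro Goal Buttons passes _ hpre
  unfold Spec_Pass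
  unfold Pre_Pass at hpre
  by_cases hn : passes ≤ (Buttons.length : Int)
  · have hA := Pass_iff Goal Buttons passes hpre
    have hB := Pass_alt_iff Goal Buttons passes hpre hn
    cases hPa : Pass Goal Buttons passes with
    | true => exact ((hB.mpr (hA.mp hPa))).symm
    | false =>
      cases hPb : Pass_alt Goal Buttons passes with
      | true => rw [hA.mpr (hB.mp hPb)] at hPa; exact hPa.symm ▸ rfl
      | false => rfl
  · have hB : Pass_alt Goal Buttons passes = false := by
      unfold Pass_alt; rw [if_pos (by omega)]
    cases hPa : Pass Goal Buttons passes with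
    | false => rw [hB]
    | true =>
      have hach := (Pass_iff Goal Buttons passes hpre).mp hPa
      have hle := Ach_length_le _ _ _ hach
      omega
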